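-- pv_equiv track=rewrite | github.com/aapris/WeatherLamp | server/endpoint/create_video_frames.py | find_cast
-- ===== SOURCE A (Python) =====
-- def find_cast(by_start_time, ts):
--     # Loop all timestamps and return last one which is smaller than ts
--     tstamps = list(by_start_time.keys())
--     prev_ts = tstamps.pop(0)
--     for t in tstamps:
--         if ts < t:
--             return prev_ts
--         else:
--             prev_ts = t
-- ===== SOURCE B (Python) =====
-- def find_cast(by_start_time, ts):
--     # Staged passes: filter the successor keys for those exceeding ts, then a
--     # positional lookup: the answer is the key sitting just before the first
--     # filtered hit; None when no successor key exceeds ts.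
--     keys = list(by_start_time.keys())
--     tail = keys[1:]
--     bigger = [k for k in tail if ts < k]
--     if not bigger:
--         return None
--     return keys[tail.index(bigger[0])]
-- ===== Notes on version B (the rewrite author's own statement) =====
-- stated objective: alternative
-- what changed: Replaces A's single destructive pass with an accumulator (pop(0) + prev-tracking loop with early return) by two staged passes: filter the successor keys for those exceeding ts, then locate the first hit with list.index and answer by positional lookup keys[i].
import Mathlib
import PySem

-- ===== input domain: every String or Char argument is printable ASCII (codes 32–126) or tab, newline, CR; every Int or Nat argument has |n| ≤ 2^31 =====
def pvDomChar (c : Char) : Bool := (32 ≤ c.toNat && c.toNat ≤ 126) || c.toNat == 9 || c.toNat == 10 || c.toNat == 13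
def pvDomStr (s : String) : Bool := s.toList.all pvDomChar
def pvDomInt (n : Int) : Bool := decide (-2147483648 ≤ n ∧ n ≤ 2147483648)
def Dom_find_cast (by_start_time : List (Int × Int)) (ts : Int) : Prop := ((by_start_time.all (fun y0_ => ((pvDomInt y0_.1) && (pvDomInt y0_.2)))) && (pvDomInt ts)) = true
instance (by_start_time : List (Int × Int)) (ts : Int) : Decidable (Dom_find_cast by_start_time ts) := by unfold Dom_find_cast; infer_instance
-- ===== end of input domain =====

-- B replaces A's destructive accumulator loop by two staged passes (filter the successor
-- keys, then list.index + positional lookup); same O(n) cost, equivalence on return values.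

-- ===== PORT A =====
-- `for t in tstamps: if ts < t: return prev_ts else prev_ts = t`; falling off the end returns None
def find_cast_loop (ts : Int) (prev_ts : Int) : List Int → Option Int
  | [] => none
  | t :: rest => if ts < t then some prev_ts else find_cast_loop ts t rest

def find_cast (by_start_time : List (Int × Int)) (ts : Int) : Option Int :=
  let tstamps := (PySem.Dict.ofList by_start_time).keys
  match tstamps with
  | [] => none            -- Python raises IndexError here (tstamps.pop(0)); excluded by Pre_
  | prev_ts :: rest => find_cast_loop ts prev_ts rest

-- ===== PORT B =====
def find_cast_alt (by_start_time : List (Int × Int)) (ts : Int) : Option Int :=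
  let keys := (PySem.Dict.ofList by_start_time).keys
  let tail := PySem.List.slice keys (some 1) none          -- keys[1:]
  let bigger := tail.filter (fun k => decide (ts < k))      -- [k for k in tail if ts < k]
  match bigger with
  | [] => none
  | b :: _ =>
    match PySem.List.index? tail b with                     -- tail.index(bigger[0]); b ∈ tail, so found
    | some i => PySem.List.pyGet? keys (i : Int)            -- keys[...]
    | none => none

-- ===== PRECONDITION & SPEC =====
-- Pre_ excludes only the empty dict, on which A raises IndexError (pop from empty list).
def Pre_find_cast (by_start_time : List (Int × Int)) (ts : Int) : Prop := by_start_time ≠ []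
instance (by_start_time : List (Int × Int)) (ts : Int) : Decidable (Pre_find_cast by_start_time ts) := by unfold Pre_find_cast; infer_instance
def pvWitness_find_cast : (List (Int × Int)) × Int := ([(5, 1), (10, 2)], 7)

def Spec_find_cast (by_start_time : List (Int × Int)) (ts : Int) (out : Option Int) : Prop := out = find_cast_alt by_start_time ts
instance (by_start_time : List (Int × Int)) (ts : Int) (out : Option Int) : Decidable (Spec_find_cast by_start_time ts out) := by unfold Spec_find_cast; infer_instance

-- ===== CLAIM (what is proved, stated in full; the proofs are below) =====
def Claim_equal_find_cast : Prop := ∀ (by_start_time : List (Int × Int)) (ts : Int), Dom_find_cast by_start_time ts → Pre_find_cast by_start_time ts → Spec_find_cast by_start_time ts (find_cast by_start_time ts)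
-- ===== LEMMAS AND PROOFS =====

-- B's staged computation (filter, first hit, positional lookup) in bind form, for the proofs
def stagedB (ts prev : Int) (rest : List Int) : Option Int :=
  ((rest.filter (fun k => decide (ts < k))).head?).bind fun b =>
    (PySem.List.index? rest b).bind fun i => PySem.List.pyGet? (prev :: rest) (i : Int)

-- A's accumulator loop equals B's staged filter-then-index computation
theorem find_cast_loop_eq_staged (ts prev : Int) (rest : List Int) :
    find_cast_loop ts prev rest = stagedB ts prev rest := by
  induction rest generalizing prev with
  | nil => simp [find_cast_loop, stagedB]
  | cons t r ih =>
    by_cases h : ts < t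
    · unfold stagedB
      rw [show (t :: r).filter (fun k => decide (ts < k)) = t :: r.filter (fun k => decide (ts < k))
            from by simp [h]]
      simp only [List.head?_cons, Option.bind_some]
      rw [PySem.List.index?_cons_self]
      simp [find_cast_loop, h]
    · rw [show find_cast_loop ts prev (t :: r) = find_cast_loop ts t r from by
            simp [find_cast_loop, h], ih t]
      unfold stagedB
      rw [show (t :: r).filter (fun k => decide (ts < k)) = r.filter (fun k => decide (ts < k))
            from by simp [h]]
      cases hf : (r.filter (fun k => decide (ts < k))).head? with
      | none => simp
      | some b =>
        have hb : ts < b := by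
          have hmem := List.mem_of_mem_head? (l := r.filter (fun k => decide (ts < k)))
            (a := b) (by rw [hf]; exact Option.mem_def.mpr rfl)
          simpa using (List.mem_filter.mp hmem).2
        have hne : t ≠ b := fun he => h (he ▸ hb)
        simp only [Option.bind_some]
        rw [PySem.List.index?_cons_of_ne r hne]
        cases hi : PySem.List.index? r b with
        | none => simp
        | some i =>
          simp only [Option.map_some, Option.bind_some]
          rw [show ((i + 1 : Nat) : Int) = ((i : Nat) : Int) + 1 from by push_cast; ring,
              PySem.List.pyGet?_cons_succ]

-- ===== VERDICT (by name: the statement is the Claim_ definition above) =====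
theorem find_cast_spec : Claim_equal_find_cast := by
  intro bst ts _ _
  unfold Spec_find_cast find_cast find_cast_alt
  simp only [PySem.List.slice_from_one]
  cases hk : (PySem.Dict.ofList bst).keys with
  | nil => rfl
  | cons prev rest =>
    show find_cast_loop ts prev rest = _
    rw [find_cast_loop_eq_staged]
    unfold stagedB
    simp only [List.tail_cons]
    cases hf : rest.filter (fun k => decide (ts < k)) with
    | nil => simp
    | cons b bs =>
      simp only [List.head?_cons, Option.bind_some]
      cases hi : PySem.List.index? rest b <;> simp
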